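-- pv_equiv track=rewrite | github.com/Sashakhoo/jobapplicationautomation | career-assistant/services/resume_optimizer.py | _reorder_skills_by_relevance
-- ===== SOURCE A (Python) =====
-- from typing import Dict, List, Optional, Tuple
--
-- def _reorder_skills_by_relevance(skills: List[str], job_requirements: Dict) -> List[str]:
--     """Reorder skills so most relevant ones appear first"""
--     required_skills = [s.lower() for s in job_requirements.get("required_skills", [])]
--     preferred_skills = [s.lower() for s in job_requirements.get("preferred_skills", [])]
--
--     def skill_score(skill: str) -> int:
--         skill_lower = skill.lower()
--         if skill_lower in required_skills:
--             return 3
--         elif skill_lower in preferred_skills: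
--             return 2
--         elif any(keyword.lower() in skill_lower for keyword in job_requirements.get("keywords", [])):
--             return 1
--         else:
--             return 0
--
--     return sorted(skills, key=skill_score, reverse=True)
-- ===== SOURCE B (Python) =====
-- def _reorder_skills_by_relevance(skills, job_requirements):
--     """Bucket (counting) distribution by score instead of a comparison sort."""
--     required = [s.lower() for s in job_requirements.get("required_skills", [])]
--     preferred = [s.lower() for s in job_requirements.get("preferred_skills", [])]
--     keywords = [k.lower() for k in job_requirements.get("keywords", [])]
--     buckets = ([], [], [], [])
--     for skill in skills:
--         sl = skill.lower()
--         if sl in required: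
--             score = 3
--         elif sl in preferred:
--             score = 2
--         elif any(k in sl for k in keywords):
--             score = 1
--         else:
--             score = 0
--         buckets[score].append(skill)
--     return buckets[3] + buckets[2] + buckets[1] + buckets[0]
-- ===== Notes on version B (the rewrite author's own statement) =====
-- stated objective: alternative
-- what changed: Replaces the stable reverse comparison sort with a single-pass bucket distribution into four score buckets concatenated high-to-low, and pre-lowers the keyword list once instead of per skill.
import Mathlib
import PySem

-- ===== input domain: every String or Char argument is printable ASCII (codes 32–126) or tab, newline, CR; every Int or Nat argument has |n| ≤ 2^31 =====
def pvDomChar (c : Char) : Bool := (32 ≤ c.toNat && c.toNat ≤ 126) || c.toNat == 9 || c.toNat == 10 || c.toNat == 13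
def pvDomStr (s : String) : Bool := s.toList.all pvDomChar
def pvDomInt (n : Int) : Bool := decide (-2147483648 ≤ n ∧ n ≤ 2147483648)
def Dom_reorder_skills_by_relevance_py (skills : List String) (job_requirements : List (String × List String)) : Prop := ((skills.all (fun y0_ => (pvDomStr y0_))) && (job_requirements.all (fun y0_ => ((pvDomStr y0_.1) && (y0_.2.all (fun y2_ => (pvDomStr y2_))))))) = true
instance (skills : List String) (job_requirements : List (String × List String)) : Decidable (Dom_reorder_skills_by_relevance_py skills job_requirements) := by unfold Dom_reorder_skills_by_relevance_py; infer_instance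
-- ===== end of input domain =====

-- B replaces A's stable reverse comparison sort by a one-pass distribution into four
-- score buckets concatenated high-to-low (objective: alternative algorithm, same cost in practice).


-- ===== PORT A =====
-- A's nested skill_score: closure over the lowered required/preferred lists and job_requirements
def pvSkillScore (required_skills preferred_skills : List String) (jr : PySem.Dict String (List String)) (skill : String) : Int :=
  let skill_lower := PySem.Str.lower skill
  if skill_lower ∈ required_skills then 3
  else if skill_lower ∈ preferred_skills then 2
  else if (jr.getD "keywords" []).any (fun keyword => PySem.Str.isIn (PySem.Str.lower keyword) skill_lower) then 1
  else 0

def reorder_skills_by_relevance_py (skills : List String) (job_requirements : List (String × List String)) : List String :=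
  let jr := PySem.Dict.mk job_requirements
  let required_skills := (jr.getD "required_skills" []).map PySem.Str.lower
  let preferred_skills := (jr.getD "preferred_skills" []).map PySem.Str.lower
  PySem.List.sorted skills (pvSkillScore required_skills preferred_skills jr) true

-- ===== PORT B =====
-- one loop iteration of B: lower the skill, score it, append it to the matching bucket
def pvBucketStep (required preferred keywords : List String)
    (buckets : List String × List String × List String × List String) (skill : String) :
    List String × List String × List String × List String :=
  let sl := PySem.Str.lower skill
  if sl ∈ required then (buckets.1 ++ [skill], buckets.2.1, buckets.2.2.1, buckets.2.2.2)
  else if sl ∈ preferred then (buckets.1, buckets.2.1 ++ [skill], buckets.2.2.1, buckets.2.2.2)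
  else if keywords.any (fun k => PySem.Str.isIn k sl) then (buckets.1, buckets.2.1, buckets.2.2.1 ++ [skill], buckets.2.2.2)
  else (buckets.1, buckets.2.1, buckets.2.2.1, buckets.2.2.2 ++ [skill])

def reorder_skills_by_relevance_py_alt (skills : List String) (job_requirements : List (String × List String)) : List String :=
  let jr := PySem.Dict.mk job_requirements
  let required := (jr.getD "required_skills" []).map PySem.Str.lower
  let preferred := (jr.getD "preferred_skills" []).map PySem.Str.lower
  let keywords := (jr.getD "keywords" []).map PySem.Str.lower
  let b := skills.foldl (pvBucketStep required preferred keywords) ([], [], [], [])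
  b.1 ++ b.2.1 ++ b.2.2.1 ++ b.2.2.2

-- ===== PRECONDITION & SPEC =====
def Spec_reorder_skills_by_relevance_py (skills : List String) (job_requirements : List (String × List String)) (out : List String) : Prop := out = reorder_skills_by_relevance_py_alt skills job_requirements
instance (skills : List String) (job_requirements : List (String × List String)) (out : List String) : Decidable (Spec_reorder_skills_by_relevance_py skills job_requirements out) := by unfold Spec_reorder_skills_by_relevance_py; infer_instance

-- ===== CLAIM (what is proved, stated in full; the proofs are below) =====
def Claim_equal_reorder_skills_by_relevance_py : Prop := ∀ (skills : List String) (job_requirements : List (String × List String)), Dom_reorder_skills_by_relevance_py skills job_requirements → Spec_reorder_skills_by_relevance_py skills job_requirements (reorder_skills_by_relevance_py skills job_requirements)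

-- ===== LEMMAS AND PROOFS =====

-- insertBy skips a prefix whose elements x is not 'before'
theorem pv_insertBy_append {α : Type} (before : α → α → Bool) (x : α) (l r : List α)
    (h : ∀ y ∈ l, before x y = false) :
    PySem.List.insertBy before x (l ++ r) = l ++ PySem.List.insertBy before x r := by
  induction l with
  | nil => simp
  | cons a t ih =>
    simp only [List.cons_append, PySem.List.insertBy, h a (by simp), Bool.false_eq_true, if_false]
    simp only [List.cons.injEq, true_and]
    exact ih (fun y hy => h y (by simp [hy]))

-- insertBy puts x in front when x is 'before' every element
theorem pv_insertBy_front {α : Type} (before : α → α → Bool) (x : α) (r : List α)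
    (h : ∀ y ∈ r, before x y = true) :
    PySem.List.insertBy before x r = x :: r := by
  cases r with
  | nil => rfl
  | cons a t => simp [PySem.List.insertBy, h a (by simp)]

-- core invariant: inserting the remaining skills into pure score buckets (insertion sort, A)
-- equals distributing them into the buckets (B) and concatenating
theorem pv_fold_eq (req pref : List String) (jr : PySem.Dict String (List String))
    (skills : List String) (b3 b2 b1 b0 : List String)
    (h3 : ∀ y ∈ b3, pvSkillScore req pref jr y = 3)
    (h2 : ∀ y ∈ b2, pvSkillScore req pref jr y = 2)
    (h1 : ∀ y ∈ b1, pvSkillScore req pref jr y = 1)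
    (h0 : ∀ y ∈ b0, pvSkillScore req pref jr y = 0) :
    List.foldl (fun acc x => PySem.List.insertBy
        (fun a b => decide (pvSkillScore req pref jr b < pvSkillScore req pref jr a)) x acc)
      (b3 ++ b2 ++ b1 ++ b0) skills
    = (fun t : List String × List String × List String × List String =>
        t.1 ++ t.2.1 ++ t.2.2.1 ++ t.2.2.2)
      (List.foldl (pvBucketStep req pref ((jr.getD "keywords" []).map PySem.Str.lower))
        (b3, b2, b1, b0) skills) := by
  induction skills generalizing b3 b2 b1 b0 with
  | nil => simp
  | cons x rest ih =>
    simp only [List.foldl_cons]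
    by_cases hc1 : PySem.Str.lower x ∈ req
    · have kx : pvSkillScore req pref jr x = 3 := by simp [pvSkillScore, hc1]
      have hins : PySem.List.insertBy
          (fun a b => decide (pvSkillScore req pref jr b < pvSkillScore req pref jr a)) x
          (b3 ++ b2 ++ b1 ++ b0) = (b3 ++ [x]) ++ b2 ++ b1 ++ b0 := by
        rw [show b3 ++ b2 ++ b1 ++ b0 = b3 ++ (b2 ++ b1 ++ b0) by simp,
          pv_insertBy_append _ _ _ _ (by intro y hy; simp [h3 y hy, kx]),
          pv_insertBy_front _ _ _ (by
            intro y hy; simp only [List.mem_append] at hy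
            rcases hy with (hy | hy) | hy
            · simp [h2 y hy, kx]
            · simp [h1 y hy, kx]
            · simp [h0 y hy, kx])]
        simp
      rw [hins, show pvBucketStep req pref ((jr.getD "keywords" []).map PySem.Str.lower) (b3, b2, b1, b0) x
          = (b3 ++ [x], b2, b1, b0) by simp [pvBucketStep, hc1]]
      exact ih (b3 ++ [x]) b2 b1 b0
        (by intro y hy; rcases List.mem_append.mp hy with hy | hy
            · exact h3 y hy
            · simp at hy; subst hy; exact kx) h2 h1 h0
    · by_cases hc2 : PySem.Str.lower x ∈ pref
      · have kx : pvSkillScore req pref jr x = 2 := by simp [pvSkillScore, hc1, hc2]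
        have hins : PySem.List.insertBy
            (fun a b => decide (pvSkillScore req pref jr b < pvSkillScore req pref jr a)) x
            (b3 ++ b2 ++ b1 ++ b0) = b3 ++ (b2 ++ [x]) ++ b1 ++ b0 := by
          rw [show b3 ++ b2 ++ b1 ++ b0 = (b3 ++ b2) ++ (b1 ++ b0) by simp,
            pv_insertBy_append _ _ _ _ (by
              intro y hy; rcases List.mem_append.mp hy with hy | hy
              · simp [h3 y hy, kx]
              · simp [h2 y hy, kx]),
            pv_insertBy_front _ _ _ (by
              intro y hy; rcases List.mem_append.mp hy with hy | hy
              · simp [h1 y hy, kx]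
              · simp [h0 y hy, kx])]
          simp
        rw [hins, show pvBucketStep req pref ((jr.getD "keywords" []).map PySem.Str.lower) (b3, b2, b1, b0) x
            = (b3, b2 ++ [x], b1, b0) by simp [pvBucketStep, hc1, hc2]]
        exact ih b3 (b2 ++ [x]) b1 b0 h3
          (by intro y hy; rcases List.mem_append.mp hy with hy | hy
              · exact h2 y hy
              · simp at hy; subst hy; exact kx) h1 h0
      · by_cases hcK : ∃ kw ∈ jr.getD "keywords" [],
            PySem.Chars.isIn (PySem.Chars.lower kw.toList) (PySem.Chars.lower x.toList) = true
        · have kx : pvSkillScore req pref jr x = 1 := by simp [pvSkillScore, hc1, hc2, hcK]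
          have hins : PySem.List.insertBy
              (fun a b => decide (pvSkillScore req pref jr b < pvSkillScore req pref jr a)) x
              (b3 ++ b2 ++ b1 ++ b0) = b3 ++ b2 ++ (b1 ++ [x]) ++ b0 := by
            rw [show b3 ++ b2 ++ b1 ++ b0 = (b3 ++ b2 ++ b1) ++ b0 by simp,
              pv_insertBy_append _ _ _ _ (by
                intro y hy; simp only [List.mem_append] at hy
                rcases hy with (hy | hy) | hy
                · simp [h3 y hy, kx]
                · simp [h2 y hy, kx]
                · simp [h1 y hy, kx]),
              pv_insertBy_front _ _ _ (by intro y hy; simp [h0 y hy, kx])]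
            simp
          rw [hins, show pvBucketStep req pref ((jr.getD "keywords" []).map PySem.Str.lower) (b3, b2, b1, b0) x
              = (b3, b2, b1 ++ [x], b0) by simp [pvBucketStep, hc1, hc2, List.any_map, Function.comp, hcK]]
          exact ih b3 b2 (b1 ++ [x]) b0 h3 h2
            (by intro y hy; rcases List.mem_append.mp hy with hy | hy
                · exact h1 y hy
                · simp at hy; subst hy; exact kx) h0
        · have hcK' : ∀ kw ∈ jr.getD "keywords" [],
              PySem.Chars.isIn (PySem.Chars.lower kw.toList) (PySem.Chars.lower x.toList) = false := by
            intro kw hkw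
            cases hiso : PySem.Chars.isIn (PySem.Chars.lower kw.toList) (PySem.Chars.lower x.toList) with
            | false => rfl
            | true => exact absurd ⟨kw, hkw, hiso⟩ hcK
          have kx : pvSkillScore req pref jr x = 0 := by
            simp [pvSkillScore, hc1, hc2]
            exact hcK'
          have hins : PySem.List.insertBy
              (fun a b => decide (pvSkillScore req pref jr b < pvSkillScore req pref jr a)) x
              (b3 ++ b2 ++ b1 ++ b0) = b3 ++ b2 ++ b1 ++ (b0 ++ [x]) := by
            rw [show b3 ++ b2 ++ b1 ++ b0 = (b3 ++ b2 ++ b1 ++ b0) ++ [] by simp,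
              pv_insertBy_append _ _ _ _ (by
                intro y hy; simp only [List.mem_append] at hy
                rcases hy with ((hy | hy) | hy) | hy
                · simp [h3 y hy, kx]
                · simp [h2 y hy, kx]
                · simp [h1 y hy, kx]
                · simp [h0 y hy, kx])]
            simp [PySem.List.insertBy]
          rw [hins, show pvBucketStep req pref ((jr.getD "keywords" []).map PySem.Str.lower) (b3, b2, b1, b0) x
              = (b3, b2, b1, b0 ++ [x]) by
                simp [pvBucketStep, hc1, hc2, List.any_map, Function.comp]
                exact hcK']
          exact ih b3 b2 b1 (b0 ++ [x]) h3 h2 h1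
            (by intro y hy; rcases List.mem_append.mp hy with hy | hy
                · exact h0 y hy
                · simp at hy; subst hy; exact kx)

-- ===== VERDICT (by name: the statement is the Claim_ definition above) =====
theorem reorder_skills_by_relevance_py_spec : Claim_equal_reorder_skills_by_relevance_py := by
  intro skills job_requirements _
  unfold Spec_reorder_skills_by_relevance_py reorder_skills_by_relevance_py reorder_skills_by_relevance_py_alt
  rw [PySem.List.sorted_rev_eq_foldl_insertBy]
  exact pv_fold_eq _ _ _ skills [] [] [] [] (by simp) (by simp) (by simp) (by simp)
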